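-- pv_equiv track=rewrite | github.com/xwoud/Algorithm | programmers/숫자게임.py | solution
-- ===== SOURCE A (Python) =====
-- def solution(A, B):
--     answer = 0
--     A.sort()
--     B.sort()
--     if min(A) > max(B) :
--         return 0
--     for i in A:
--         for k in B:
--             if i < k :
--                 answer += 1
--                 B.remove(k)
--                 break
--     return answer
-- ===== SOURCE B (Python) =====
-- def solution(A, B):
--     # Two-pointer sweep over both sorted lists (return-value equivalent to A;
--     # like A, this sorts A and B in place, but it does not remove from B).
--     A.sort()
--     B.sort()
--     answer = 0
--     j = 0
--     for a in A:
--         while j < len(B) and B[j] <= a: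
--             j += 1
--         if j < len(B):
--             answer += 1
--             j += 1
--     return answer
-- ===== Notes on version B (the rewrite author's own statement) =====
-- stated objective: faster
-- what changed: Replaces A's nested rescan-from-the-start of B with list.remove per A-element by a single two-pointer sweep over both sorted lists.
import Mathlib
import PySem

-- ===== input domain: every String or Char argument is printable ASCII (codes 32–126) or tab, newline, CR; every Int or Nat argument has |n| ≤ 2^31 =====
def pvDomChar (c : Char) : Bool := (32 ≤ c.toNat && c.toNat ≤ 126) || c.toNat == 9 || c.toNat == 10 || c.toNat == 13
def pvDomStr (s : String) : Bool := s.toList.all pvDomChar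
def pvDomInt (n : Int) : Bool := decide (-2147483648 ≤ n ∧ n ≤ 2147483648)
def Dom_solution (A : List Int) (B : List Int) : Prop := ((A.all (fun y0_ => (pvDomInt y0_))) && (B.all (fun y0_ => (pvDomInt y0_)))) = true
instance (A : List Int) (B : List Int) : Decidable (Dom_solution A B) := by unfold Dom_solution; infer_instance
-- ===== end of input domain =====

-- B replaces A's quadratic rescan-of-B-with-remove by a two-pointer sweep over both sorted
-- lists (return-value equivalence only: A also removes matched elements from B in place).


-- ===== PORT A =====
-- inner 'for k in B: if i < k: …; break' — scan for the first k with i < k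
def aScan (i : Int) : List Int → Option Int
  | [] => none
  | k :: rest => if i < k then some k else aScan i rest

-- outer 'for i in A' carrying the mutable B and answer
def aLoop : List Int → List Int → Int → Int
  | [], _, ans => ans
  | i :: rest, Bcur, ans =>
    match aScan i Bcur with
    | some k => aLoop rest ((PySem.List.remove? Bcur k).getD Bcur) (ans + 1)
    | none => aLoop rest Bcur ans

def solution (A : List Int) (B : List Int) : Int :=
  let sA := PySem.List.sorted A (fun x => x) false
  let sB := PySem.List.sorted B (fun x => x) false
  match PySem.List.min? sA (fun x => x), PySem.List.max? sB (fun x => x) with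
  | some m, some M => if m > M then 0 else aLoop sA sB 0
  | _, _ => 0   -- unreachable under Pre_: Python raises ValueError on an empty list

-- ===== PORT B =====
-- 'while j < len(B) and B[j] <= a: j += 1'
def bAdvance (a : Int) (B : List Int) (j : Nat) : Nat :=
  if h : j < B.length then
    if B[j] ≤ a then bAdvance a B (j + 1) else j
  else j
termination_by B.length - j

-- 'for a in A' carrying j and answer
def bLoop (B : List Int) : List Int → Nat → Int → Int
  | [], _, ans => ans
  | a :: rest, j, ans =>
    let j' := bAdvance a B j
    if j' < B.length then bLoop B rest (j' + 1) (ans + 1) else bLoop B rest j' ans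

def solution_alt (A : List Int) (B : List Int) : Int :=
  let sA := PySem.List.sorted A (fun x => x) false
  let sB := PySem.List.sorted B (fun x => x) false
  bLoop sB sA 0 0

-- ===== PRECONDITION & SPEC =====
-- Pre_ excludes exactly the inputs where Python A raises: min(A)/max(B) of an empty list (ValueError)
def Pre_solution (A : List Int) (B : List Int) : Prop := A ≠ [] ∧ B ≠ []
instance (A : List Int) (B : List Int) : Decidable (Pre_solution A B) := by unfold Pre_solution; infer_instance
def pvWitness_solution : List Int × List Int := ([1, 3, 2], [2, 1, 3])

def Spec_solution (A : List Int) (B : List Int) (out : Int) : Prop := out = solution_alt A B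
instance (A : List Int) (B : List Int) (out : Int) : Decidable (Spec_solution A B out) := by unfold Spec_solution; infer_instance

-- ===== CLAIM (what is proved, stated in full; the proofs are below) =====
def Claim_equal_solution : Prop := ∀ (A : List Int) (B : List Int), Dom_solution A B → Pre_solution A B → Spec_solution A B (solution A B)

-- ===== LEMMAS AND PROOFS =====

lemma bAdvance_eq (a : Int) (B : List Int) (j : Nat) :
    bAdvance a B j = j + ((B.drop j).takeWhile (fun k => decide (k ≤ a))).length := by
  fun_induction bAdvance a B j with
  | case1 j h hle ih =>
    rw [ih, List.drop_eq_getElem_cons h, List.takeWhile_cons]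
    simp [hle]; omega
  | case2 j h hle =>
    rw [List.drop_eq_getElem_cons h, List.takeWhile_cons]
    simp [hle]
  | case3 j h =>
    rw [List.drop_eq_nil_iff.mpr (by omega)]
    simp

lemma aScan_eq (a : Int) (L : List Int) :
    aScan a L = ((L.dropWhile (fun k => decide (k ≤ a)))).head? := by
  induction L with
  | nil => rfl
  | cons k rest ih =>
    rw [aScan, List.dropWhile_cons]
    by_cases h : a < k
    · simp [h, not_le.mpr h]
    · simp only [if_neg h, ih]
      simp [not_lt.mp h]

lemma aScan_append_le (a : Int) (U L : List Int) (hU : ∀ u ∈ U, u ≤ a) :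
    aScan a (U ++ L) = aScan a L := by
  induction U with
  | nil => rfl
  | cons u U' ih =>
    rw [List.cons_append, aScan, if_neg (not_lt.mpr (hU u List.mem_cons_self))]
    exact ih (fun v hv => hU v (List.mem_cons_of_mem _ hv))

lemma remove?_append_not_mem {v : Int} (pre xs : List Int) (h : v ∉ pre) :
    PySem.List.remove? (pre ++ xs) v = (PySem.List.remove? xs v).map (pre ++ ·) := by
  induction pre with
  | nil => simp [Option.map_id']
  | cons p pre' ih =>
    rw [List.cons_append,
      PySem.List.remove?_cons_of_ne (pre' ++ xs) (by rintro rfl; exact h List.mem_cons_self),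
      ih (fun hv => h (List.mem_cons_of_mem _ hv)), Option.map_map]
    rfl

-- the head of the dropped suffix fails the predicate
lemma head_dropWhile_false (p : Int → Bool) (l : List Int) (x : Int) (xs : List Int)
    (h : l.dropWhile p = x :: xs) : p x = false := by
  induction l with
  | nil => simp at h
  | cons y l' ih =>
    rw [List.dropWhile_cons] at h
    by_cases hy : p y
    · exact ih (by simpa [hy] using h)
    · simp [hy] at h
      simpa [h.1] using hy

-- the dropped suffix is a drop at the kept prefix's length
lemma dropWhile_eq_drop (p : Int → Bool) (l : List Int) :
    l.dropWhile p = l.drop (l.takeWhile p).length := by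
  induction l with
  | nil => rfl
  | cons x l ih =>
    by_cases h : p x <;> simp [h, ih]

-- main invariant: A's mutable-B loop equals the two-pointer loop
lemma loop_inv (Ar : List Int) : ∀ (U Bf : List Int) (j : Nat) (ans : Int),
    Ar.Pairwise (· ≤ ·) →
    (∀ u ∈ U, ∀ x ∈ Ar, u ≤ x) →
    j ≤ Bf.length →
    aLoop Ar (U ++ Bf.drop j) ans = bLoop Bf Ar j ans := by
  induction Ar with
  | nil => intro U Bf j ans _ _ _; rfl
  | cons a rest ih =>
    intro U Bf j ans hpair hU hj
    have hUa : ∀ u ∈ U, u ≤ a := fun u hu => hU u hu a List.mem_cons_self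
    have hax : ∀ x ∈ rest, a ≤ x := (List.pairwise_cons.mp hpair).1
    have hpair' : rest.Pairwise (· ≤ ·) := (List.pairwise_cons.mp hpair).2
    set L := Bf.drop j with hL
    set p : Int → Bool := fun k => decide (k ≤ a) with hp
    have hTD : L.takeWhile p ++ L.dropWhile p = L := List.takeWhile_append_dropWhile
    have hTle : ∀ t ∈ L.takeWhile p, t ≤ a := fun t ht => by
      have := List.mem_takeWhile_imp ht; simpa [hp] using this
    have hLlen : L.length = Bf.length - j := List.length_drop
    have hTlen : (L.takeWhile p).length + (L.dropWhile p).length = L.length := by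
      rw [← List.length_append, hTD]
    have hscan : aScan a (U ++ L) = (L.dropWhile p).head? := by
      rw [aScan_append_le a U L hUa, aScan_eq]
    have hadv : bAdvance a Bf j = j + (L.takeWhile p).length := bAdvance_eq a Bf j
    rw [aLoop, bLoop, hscan, hadv]
    cases hD : L.dropWhile p with
    | nil =>
      have hTL : L.takeWhile p = L := by
        have h2 := hTD; rw [hD, List.append_nil] at h2; exact h2
      have hnm : ¬ (j + (L.takeWhile p).length < Bf.length) := by
        rw [hTL]; omega
      simp only [List.head?_nil, if_neg hnm]
      have hdrop : Bf.drop (j + (L.takeWhile p).length) = [] :=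
        List.drop_eq_nil_iff.mpr (by rw [hTL]; omega)
      have := ih (U ++ L) Bf (j + (L.takeWhile p).length) ans hpair'
        (by
          intro u hu x hx
          rcases List.mem_append.mp hu with h1 | h1
          · exact hU u h1 x (List.mem_cons_of_mem _ hx)
          · exact le_trans (hTle u (by rwa [hTL])) (hax x hx))
        (by rw [hTL]; omega)
      rw [hdrop, List.append_nil] at this
      exact this
    | cons k D' =>
      have hak : a < k := by
        have := head_dropWhile_false p L k D' hD
        simpa [hp] using this
      have hlt : j + (L.takeWhile p).length < Bf.length := by
        have h1 := hTlen
        rw [hD] at h1; simp at h1; omega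
      simp only [List.head?_cons, if_pos hlt]
      have hrem : (PySem.List.remove? (U ++ L) k).getD (U ++ L)
          = (U ++ L.takeWhile p) ++ D' := by
        have hLsplit : U ++ L = (U ++ L.takeWhile p) ++ (k :: D') := by
          rw [List.append_assoc, ← hD, hTD]
        rw [hLsplit, remove?_append_not_mem _ _ (by
          intro hk
          rcases List.mem_append.mp hk with h1 | h1
          · exact absurd (hUa k h1) (not_le.mpr hak)
          · exact absurd (hTle k h1) (not_le.mpr hak))]
        simp
      rw [hrem]
      have hdrop' : Bf.drop (j + (L.takeWhile p).length + 1) = D' := by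
        have hstep : Bf.drop (j + (L.takeWhile p).length) = L.dropWhile p := by
          rw [← List.drop_drop, ← hL, ← dropWhile_eq_drop]
        rw [← List.drop_drop, hstep, hD, List.drop_one]
        rfl
      have := ih (U ++ L.takeWhile p) Bf (j + (L.takeWhile p).length + 1) (ans + 1) hpair'
        (by
          intro u hu x hx
          rcases List.mem_append.mp hu with h1 | h1
          · exact hU u h1 x (List.mem_cons_of_mem _ hx)
          · exact le_trans (hTle u h1) (hax x hx))
        (by omega)
      rw [hdrop'] at this
      exact this

lemma bLoop_no_match (Bf : List Int) (Ar : List Int) : ∀ (j : Nat) (ans : Int),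
    (∀ a ∈ Ar, ∀ k ∈ Bf, k ≤ a) →
    bLoop Bf Ar j ans = ans := by
  induction Ar with
  | nil => intro j ans _; rfl
  | cons a rest ih =>
    intro j ans hle
    have hall : ∀ k ∈ Bf.drop j, (fun k => decide (k ≤ a)) k := by
      intro k hk
      simpa using hle a List.mem_cons_self k (List.mem_of_mem_drop hk)
    have hadv : bAdvance a Bf j = j + (Bf.drop j).length := by
      rw [bAdvance_eq, List.takeWhile_eq_self_iff.mpr hall]
    have hnm : ¬ (bAdvance a Bf j < Bf.length) := by
      rw [hadv, List.length_drop]; omega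
    rw [bLoop, if_neg hnm]
    exact ih _ _ (fun x hx k hk => hle x (List.mem_cons_of_mem _ hx) k hk)

-- ===== VERDICT (by name: the statement is the Claim_ definition above) =====
theorem solution_spec : Claim_equal_solution := by
  intro A B _ hPre
  unfold Spec_solution solution solution_alt
  obtain ⟨hA, hB⟩ := hPre
  have hsA : PySem.List.sorted A (fun x => x) false ≠ [] := by
    rw [Ne, PySem.List.sorted_eq_nil_iff]; exact hA
  have hsB : PySem.List.sorted B (fun x => x) false ≠ [] := by
    rw [Ne, PySem.List.sorted_eq_nil_iff]; exact hB
  cases hm : PySem.List.min? (PySem.List.sorted A (fun x => x) false) (fun x => x) with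
  | none => exact absurd ((PySem.List.min?_eq_none_iff _ _).mp hm) hsA
  | some m =>
  cases hM : PySem.List.max? (PySem.List.sorted B (fun x => x) false) (fun x => x) with
  | none => exact absurd ((PySem.List.max?_eq_none_iff _ _).mp hM) hsB
  | some M =>
  simp only [hm, hM]
  by_cases hcmp : m > M
  · rw [if_pos hcmp]
    refine (bLoop_no_match _ _ 0 0 ?_).symm
    intro a ha k hk
    have h1 : k ≤ M := PySem.List.max?_isMax hM k hk
    have h2 : m ≤ a := PySem.List.min?_isMin hm a ha
    omega
  · rw [if_neg hcmp]
    have := loop_inv (PySem.List.sorted A (fun x => x) false) []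
      (PySem.List.sorted B (fun x => x) false) 0 0
      (PySem.List.sorted_pairwise A (fun x => x)) (by simp) (by omega)
    simpa using this
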